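-- pv_equiv track=rewrite | github.com/mono1230/makespan | MakespanExperimentals/SortedApproximate.py | sortedApproximation
-- ===== SOURCE A (Python) =====
-- def sortedApproximation(numOfMachines, input):
--     machines = [0]*numOfMachines
--     input.sort(reverse = True)
--     for i in input:
--         (p,q) = min((a,b) for b,a in enumerate(machines))
--         machines[q] = machines[q]+i
--
--     makespan = 0
--     for j in machines:
--         if j > makespan:
--             makespan = j
--     return makespan
-- ===== SOURCE B (Python) =====
-- # Greedy LPT makespan: keep the machine loads as one ascending sorted list,
-- # so the least-loaded machine is always the front element; the makespan is
-- # the last (largest) load. Does not mutate the caller's input list.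
--
-- def _insort(xs, v):
--     k = 0
--     while k < len(xs) and xs[k] < v:
--         k += 1
--     xs.insert(k, v)
--
--
-- def sortedApproximation(numOfMachines, input):
--     loads = [0] * numOfMachines  # ascending
--     for i in sorted(input, reverse=True):
--         least = loads.pop(0)
--         _insort(loads, least + i)
--     return loads[-1]
-- ===== Notes on version B (the rewrite author's own statement) =====
-- stated objective: alternative
-- what changed: B keeps the machine loads as one ascending sorted list (pop the front = least-loaded machine, re-insert in order, makespan = last element) instead of A's full (load, index)-min rescan of all machines per job; Pre_ requires at least one machine, since with numOfMachines <= 0 A raises ValueError on any non-empty job list and B's loads[-1] raises IndexError.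
-- intended difference: On a single machine with jobs summing to a negative total, A returns 0 (its running-max loop starts at makespan = 0) while B returns the machine's actual load sum(input), the true makespan of the schedule; for two or more machines the maximum load never drops below 0 and the two agree. — e.g. on sortedApproximation(1, [-1]): A returns 0, B returns -1
-- outside the precondition, e.g. on sortedApproximation(0, []): A returns 0, B raises IndexError
import Mathlib
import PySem

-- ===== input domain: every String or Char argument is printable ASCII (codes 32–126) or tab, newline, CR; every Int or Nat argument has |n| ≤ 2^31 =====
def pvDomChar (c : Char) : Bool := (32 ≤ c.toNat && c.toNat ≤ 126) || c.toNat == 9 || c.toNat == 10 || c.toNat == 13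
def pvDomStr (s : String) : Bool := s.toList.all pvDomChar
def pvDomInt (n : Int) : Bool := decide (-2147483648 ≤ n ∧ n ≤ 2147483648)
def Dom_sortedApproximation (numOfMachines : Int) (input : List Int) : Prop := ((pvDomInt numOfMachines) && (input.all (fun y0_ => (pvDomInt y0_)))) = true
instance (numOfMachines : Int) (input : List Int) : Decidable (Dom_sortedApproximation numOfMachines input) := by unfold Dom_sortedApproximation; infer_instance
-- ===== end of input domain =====

-- B keeps the machine loads as one ascending sorted list (front = least-loaded machine,
-- makespan = last element) instead of A's full (load, index)-min rescan per job;
-- equivalence is about the return value (A sorts the caller's input list in place, B does not).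

-- ===== PORT A =====
-- running minimum of min((a, b) for b, a in enumerate(machines)): Python's min over a
-- generator is one pass keeping the smallest tuple seen so far (lexicographic tuple <)
def minStep (acc : Option (Int × Int)) (x : Int × Int) : Option (Int × Int) :=
  match acc with
  | none => some x
  | some m => if (decide (x.1 < m.1) || (!decide (m.1 < x.1) && decide (x.2 < m.2))) = true
              then some x else some m

def sortedApproximation (numOfMachines : Int) (input : List Int) : Int :=
  -- machines = [0]*numOfMachines
  let machines : List Int := List.replicate numOfMachines.toNat 0
  -- input.sort(reverse=True)
  let inp := PySem.List.sorted input (fun x => x) true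
  -- for i in input: (p,q) = min((a,b) for b,a in enumerate(machines)); machines[q] = machines[q]+i
  -- (the min-of-generator is the running-minimum fold, with enumerate's counter carried along)
  let machines := inp.foldl (fun (ms : List Int) (i : Int) =>
    match (ms.foldl (fun (acc : Option (Int × Int) × Int) (a : Int) =>
            (minStep acc.1 (a, acc.2), acc.2 + 1)) (none, 0)).1 with
    | some pq => PySem.List.pySetD ms pq.2 (PySem.List.pyGetD ms pq.2 0 + i)
        -- q comes from enumerate, so the index is always in range: pySetD/pyGetD are exact here
    | none => ms   -- Python: min() of an empty sequence raises ValueError; excluded by Pre_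
    ) machines
  -- makespan = 0; for j in machines: if j > makespan: makespan = j
  machines.foldl (fun makespan j => if j > makespan then j else makespan) 0

-- ===== PORT B =====
-- _insort(xs, v): k = 0; while k < len(xs) and xs[k] < v: k += 1; xs.insert(k, v)
def insortLoad (xs : List Int) (v : Int) : List Int :=
  -- the while loop counts the leading elements with xs[k] < v
  let k := (xs.takeWhile (fun x => decide (x < v))).length
  xs.take k ++ [v] ++ xs.drop k

def sortedApproximation_alt (numOfMachines : Int) (input : List Int) : Int :=
  -- loads = [0] * numOfMachines
  let loads : List Int := List.replicate numOfMachines.toNat 0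
  -- for i in sorted(input, reverse=True): least = loads.pop(0); _insort(loads, least + i)
  let loads := (PySem.List.sorted input (fun x => x) true).foldl (fun loads i =>
    match loads with
    | [] => []   -- Python: loads.pop(0) raises IndexError here; excluded by Pre_
    | least :: rest => insortLoad rest (least + i)) loads
  -- return loads[-1]
  match loads.getLast? with
  | some x => x
  | none => 0   -- Python: loads[-1] raises IndexError here; excluded by Pre_

-- ===== PRECONDITION & SPEC =====
-- Pre_ requires at least one machine: with numOfMachines ≤ 0, A raises ValueError
-- (min of an empty sequence) on any non-empty job list, and B's loads[-1] / loads.pop(0)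
-- raises IndexError even for the empty job list (where A returns 0).
def Pre_sortedApproximation (numOfMachines : Int) (input : List Int) : Prop :=
  0 < numOfMachines
instance (numOfMachines : Int) (input : List Int) : Decidable (Pre_sortedApproximation numOfMachines input) := by unfold Pre_sortedApproximation; infer_instance

def pvWitness_sortedApproximation : Int × List Int := (3, [5, 3, 2, 7, 3])

-- On a single machine with jobs summing to a negative total, A returns 0 (its running-max
-- loop starts at makespan = 0) while B returns the machine's actual load sum(input), the
-- true makespan of the schedule; for two or more machines the maximum load never drops
-- below 0 and the two agree.
def D_sortedApproximation (numOfMachines : Int) (input : List Int) : Prop :=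
  numOfMachines = 1 ∧ input.sum < 0
instance (numOfMachines : Int) (input : List Int) : Decidable (D_sortedApproximation numOfMachines input) := by unfold D_sortedApproximation; infer_instance

def Spec_sortedApproximation (numOfMachines : Int) (input : List Int) (out : Int) : Prop := ¬ D_sortedApproximation numOfMachines input → out = sortedApproximation_alt numOfMachines input
instance (numOfMachines : Int) (input : List Int) (out : Int) : Decidable (Spec_sortedApproximation numOfMachines input out) := by unfold Spec_sortedApproximation; infer_instance

def pvDiffWitness_sortedApproximation : Int × List Int := (1, [-1])
def pvDiffWitnessOut_sortedApproximation : Int × Int := (0, -1)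

-- ===== CLAIM (what is proved, stated in full; the proofs are below) =====
def Claim_unchanged_sortedApproximation : Prop := ∀ (numOfMachines : Int) (input : List Int), Dom_sortedApproximation numOfMachines input → Pre_sortedApproximation numOfMachines input → Spec_sortedApproximation numOfMachines input (sortedApproximation numOfMachines input)
def Claim_changed_sortedApproximation : Prop := Dom_sortedApproximation (pvDiffWitness_sortedApproximation.1) (pvDiffWitness_sortedApproximation.2) ∧ Pre_sortedApproximation (pvDiffWitness_sortedApproximation.1) (pvDiffWitness_sortedApproximation.2) ∧ D_sortedApproximation (pvDiffWitness_sortedApproximation.1) (pvDiffWitness_sortedApproximation.2) ∧ sortedApproximation (pvDiffWitness_sortedApproximation.1) (pvDiffWitness_sortedApproximation.2) = pvDiffWitnessOut_sortedApproximation.1 ∧ sortedApproximation_alt (pvDiffWitness_sortedApproximation.1) (pvDiffWitness_sortedApproximation.2) = pvDiffWitnessOut_sortedApproximation.2 ∧ pvDiffWitnessOut_sortedApproximation.1 ≠ pvDiffWitnessOut_sortedApproximation.2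
def Claim_exact_sortedApproximation : Prop := ∀ (numOfMachines : Int) (input : List Int), Dom_sortedApproximation numOfMachines input → Pre_sortedApproximation numOfMachines input → D_sortedApproximation numOfMachines input → sortedApproximation numOfMachines input ≠ sortedApproximation_alt numOfMachines input

-- ===== LEMMAS AND PROOFS =====

-- Python's lexicographic order on int pairs
def lexLe (a b : Int × Int) : Prop := a.1 < b.1 ∨ (a.1 = b.1 ∧ a.2 ≤ b.2)
def lexLt (a b : Int × Int) : Prop := a.1 < b.1 ∨ (a.1 = b.1 ∧ a.2 < b.2)

theorem lexLe_refl (a : Int × Int) : lexLe a a := by unfold lexLe; omega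

theorem lexLe_trans {a b c : Int × Int} (h1 : lexLe a b) (h2 : lexLe b c) : lexLe a c := by
  unfold lexLe at *; omega

theorem lexLe_of_not_lt {a b : Int × Int} (h : ¬ lexLt a b) : lexLe b a := by
  unfold lexLt at h; unfold lexLe; omega

theorem lexLe_of_lt {a b : Int × Int} (h : lexLt a b) : lexLe a b := by
  unfold lexLt at h; unfold lexLe; omega

-- the replacement test inside minStep is exactly lexLt
theorem min2_cond_iff (x m : Int × Int) :
    ((decide (x.1 < m.1) || (!decide (m.1 < x.1) && decide (x.2 < m.2))) = true) ↔ lexLt x m := by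
  unfold lexLt; simp; omega

theorem min2_foldl_min {f : Option (Int × Int) → (Int × Int) → Option (Int × Int)} :
    ∀ (L : List (Int × Int)) (acc m : Int × Int), L.foldl f (some acc) = some m →
    (∀ m x, lexLt x m → f (some m) x = some x) →
    (∀ m x, ¬ lexLt x m → f (some m) x = some m) →
    (m = acc ∨ m ∈ L) ∧ lexLe m acc ∧ ∀ y ∈ L, lexLe m y := by
  intro L
  induction L with
  | nil =>
    intro acc m h _ _
    simp only [List.foldl_nil, Option.some.injEq] at h
    simp [← h, lexLe_refl]
  | cons x t ih =>
    intro acc m h hf1 hf2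
    simp only [List.foldl_cons] at h
    by_cases hlt : lexLt x acc
    · rw [hf1 acc x hlt] at h
      obtain ⟨hm, hle, hall⟩ := ih x m h hf1 hf2
      refine ⟨Or.inr (by rcases hm with rfl | hm <;> first | exact List.mem_cons_self | exact List.mem_cons_of_mem _ hm),
        lexLe_trans hle (lexLe_of_lt hlt), ?_⟩
      intro y hy
      rcases List.mem_cons.mp hy with rfl | hy
      · exact hle
      · exact hall y hy
    · rw [hf2 acc x hlt] at h
      obtain ⟨hm, hle, hall⟩ := ih acc m h hf1 hf2
      refine ⟨by rcases hm with rfl | hm <;> first | exact Or.inl rfl | exact Or.inr (List.mem_cons_of_mem _ hm), hle, ?_⟩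
      intro y hy
      rcases List.mem_cons.mp hy with rfl | hy
      · exact lexLe_trans hle (lexLe_of_not_lt hlt)
      · exact hall y hy

theorem minscan_min {L : List (Int × Int)} {m : Int × Int}
    (h : L.foldl minStep none = some m) :
    m ∈ L ∧ ∀ y ∈ L, lexLe m y := by
  match L with
  | [] => simp at h
  | x :: t =>
    simp only [List.foldl_cons] at h
    rw [show minStep none x = some x from rfl] at h
    obtain ⟨hm, hle, hall⟩ := min2_foldl_min t x m h
      (by intro m x hlt
          exact if_pos ((min2_cond_iff x m).mpr hlt))
      (by intro m x hlt
          exact if_neg (fun hc => hlt ((min2_cond_iff x m).mp hc)))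
    refine ⟨by rcases hm with rfl | hm <;> first | exact List.mem_cons_self | exact List.mem_cons_of_mem _ hm, ?_⟩
    intro y hy
    rcases List.mem_cons.mp hy with rfl | hy
    · exact hle
    · exact hall y hy

-- the (value, index) view of the machine list, as port A builds it
def epairs (s : Int) (ms : List Int) : List (Int × Int) :=
  (PySem.List.enumerate ms s).map (fun ba => (ba.2, ba.1))

theorem epairs_cons (s : Int) (a : Int) (t : List Int) :
    epairs s (a :: t) = (a, s) :: epairs (s + 1) t := by
  simp [epairs, PySem.List.enumerate_cons]

theorem mem_epairs {s : Int} {ms : List Int} {p q : Int} (h : (p, q) ∈ epairs s ms) :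
    ∃ (k : Nat), ∃ (hk : k < ms.length), q = s + k ∧ p = ms[k] := by
  unfold epairs at h
  obtain ⟨⟨q', p'⟩, hmem, hpq⟩ := List.mem_map.mp h
  obtain ⟨k, hk, he⟩ := (PySem.List.mem_enumerate_iff ms s (q', p')).mp hmem
  simp only [Prod.mk.injEq] at hpq he
  exact ⟨k, hk, by omega, by rw [← hpq.1, he.2]⟩

theorem mem_epairs_of_getElem {s : Int} {ms : List Int} {k : Nat} (hk : k < ms.length) :
    (ms[k], s + (k : Int)) ∈ epairs s ms := by
  unfold epairs
  refine List.mem_map.mpr ⟨(s + (k : Int), ms[k]), ?_, rfl⟩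
  exact (PySem.List.mem_enumerate_iff ms s _).mpr ⟨k, hk, by simp⟩

theorem epairs_get {s : Int} {ms : List Int} {p q : Int} (h : (p, q) ∈ epairs s ms) :
    PySem.List.pyGetD ms (q - s) 0 = p := by
  obtain ⟨k, hk, hq, hp⟩ := mem_epairs h
  have h0 : (0 : Int) ≤ q - s := by omega
  have h1 : q - s < (ms.length : Int) := by omega
  rw [PySem.List.pyGetD_eq_getElem ms 0 h0 h1, hp]
  congr 1
  omega

-- A's inner scan equals the running minimum over the (value, index) pairs
theorem minscan_bridge : ∀ (ms : List Int) (o : Option (Int × Int)) (s : Int),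
    (ms.foldl (fun (acc : Option (Int × Int) × Int) (a : Int) =>
      (minStep acc.1 (a, acc.2), acc.2 + 1)) (o, s)).1 = (epairs s ms).foldl minStep o := by
  intro ms
  induction ms with
  | nil => intro o s; simp [epairs, PySem.List.enumerate]
  | cons a t ih =>
    intro o s
    rw [epairs_cons]
    simpa using ih (minStep o (a, s)) (s + 1)

theorem foldl_step_ne_none {f : Option (Int × Int) → (Int × Int) → Option (Int × Int)} :
    ∀ (t : List (Int × Int)) (acc : Int × Int), t.foldl f (some acc) = none →
    (∀ m x, ∃ r, f (some m) x = some r) → False := by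
  intro t
  induction t with
  | nil => intro acc h _; simp at h
  | cons x t ih =>
    intro acc h hf
    obtain ⟨r, hr⟩ := hf acc x
    simp only [List.foldl_cons, hr] at h
    exact ih r h hf

-- insortLoad inserts: closed form, permutation, order and length preservation
theorem dropWhile_head_false {p : Int → Bool} {l : List Int} {x : Int}
    {d : List Int} (h : l.dropWhile p = x :: d) : p x = false := by
  induction l with
  | nil => simp at h
  | cons a t ih =>
    rw [List.dropWhile_cons] at h
    split at h
    · exact ih h
    · next hc => injection h with h1 _; subst h1; simpa using hc

theorem insortLoad_eq (xs : List Int) (v : Int) :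
    insortLoad xs v =
      xs.takeWhile (fun x => decide (x < v)) ++ v :: xs.dropWhile (fun x => decide (x < v)) := by
  dsimp only [insortLoad]
  rw [← List.prefix_iff_eq_take.mp (List.takeWhile_prefix _)]
  have hgen : ∀ (t d : List Int), t ++ d = xs → xs.drop t.length = d := by
    intro t d h
    rw [← h, List.drop_left]
  have hdrop := hgen _ _ (List.takeWhile_append_dropWhile
    (p := fun x => decide (x < v)) (l := xs))
  rw [hdrop, List.append_assoc, List.singleton_append]

theorem insortLoad_perm (xs : List Int) (v : Int) :
    (insortLoad xs v).Perm (v :: xs) := by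
  rw [insortLoad_eq]
  have := @List.perm_middle _ v
    (xs.takeWhile (fun x => decide (x < v)))
    (xs.dropWhile (fun x => decide (x < v)))
  rwa [List.takeWhile_append_dropWhile] at this

theorem insortLoad_pairwise {xs : List Int} (hs : xs.Pairwise (· ≤ ·)) (v : Int) :
    (insortLoad xs v).Pairwise (· ≤ ·) := by
  rw [insortLoad_eq]
  have hsplit := hs
  rw [← List.takeWhile_append_dropWhile (p := fun x => decide (x < v)) (l := xs)] at hsplit
  obtain ⟨p1, p2, cross⟩ := List.pairwise_append.mp hsplit
  refine List.pairwise_append.mpr ⟨p1, ?_, ?_⟩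
  · refine List.pairwise_cons.mpr ⟨?_, p2⟩
    intro b hb
    rcases hdw : xs.dropWhile (fun x => decide (x < v)) with _ | ⟨h0, d⟩
    · rw [hdw] at hb; simp at hb
    · rw [hdw] at hb p2
      have h0v : v ≤ h0 := by
        have := of_decide_eq_false (dropWhile_head_false hdw)
        omega
      rcases List.mem_cons.mp hb with rfl | hbd
      · exact h0v
      · exact le_trans h0v ((List.pairwise_cons.mp p2).1 b hbd)
  · intro a ha b hb
    have hca : a < v := by
      have := List.mem_takeWhile_imp ha
      simpa using this
    rcases List.mem_cons.mp hb with rfl | hbd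
    · exact le_of_lt hca
    · exact cross a ha b hbd

-- the head of a (· ≤ ·)-sorted list is minimal, the last element maximal
theorem head_min {h : Int} {t : List Int} (hs : (h :: t).Pairwise (· ≤ ·)) :
    ∀ x ∈ h :: t, h ≤ x := by
  intro x hx
  rcases List.mem_cons.mp hx with rfl | hx
  · exact le_refl x
  · exact (List.pairwise_cons.mp hs).1 x hx

theorem last_max : ∀ {l : List Int}, l.Pairwise (· ≤ ·) → ∀ {lb : Int},
    l.getLast? = some lb → ∀ x ∈ l, x ≤ lb := by
  intro l
  induction l with
  | nil => intro _ lb h; simp at h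
  | cons a t ih =>
    intro hs lb hl x hx
    obtain ⟨ha, ht⟩ := List.pairwise_cons.mp hs
    match t with
    | [] =>
      simp only [List.getLast?_singleton, Option.some.injEq] at hl
      rcases List.mem_singleton.mp hx with rfl
      rw [← hl]
    | b :: t' =>
      rw [List.getLast?_cons_cons] at hl
      rcases List.mem_cons.mp hx with rfl | hx
      · exact ha lb (List.mem_of_getLast? hl)
      · exact ih ht hl x hx

-- the two loop bodies, named for the proofs (definitionally the ports' lambdas)
def stepA (ms : List Int) (i : Int) : List Int :=
  match (ms.foldl (fun (acc : Option (Int × Int) × Int) (a : Int) =>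
          (minStep acc.1 (a, acc.2), acc.2 + 1)) (none, 0)).1 with
  | some pq => PySem.List.pySetD ms pq.2 (PySem.List.pyGetD ms pq.2 0 + i)
  | none => ms

def stepB (loads : List Int) (i : Int) : List Int :=
  match loads with
  | [] => []
  | least :: rest => insortLoad rest (least + i)

-- set at an in-range index is, up to permutation, replace-one-occurrence
theorem set_perm_cons_eraseIdx : ∀ (ms : List Int) (q : Nat), q < ms.length → ∀ (v : Int),
    (ms.set q v).Perm (v :: ms.eraseIdx q) := by
  intro ms
  induction ms with
  | nil => intro q hq; simp at hq
  | cons a t ih =>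
    intro q hq v
    match q with
    | 0 => simp
    | Nat.succ q' =>
      rw [List.set_cons_succ, List.eraseIdx_cons_succ]
      have hq' : q' < t.length := by simpa using hq
      exact ((ih q' hq' v).cons a).trans (List.Perm.swap _ _ _)

theorem cons_eraseIdx_perm : ∀ (ms : List Int) (q : Nat) (hq : q < ms.length),
    (ms[q] :: ms.eraseIdx q).Perm ms := by
  intro ms
  induction ms with
  | nil => intro q hq; simp at hq
  | cons a t ih =>
    intro q hq
    match q with
    | 0 => simp
    | Nat.succ q' =>
      have hq' : q' < t.length := by simpa using hq
      rw [List.eraseIdx_cons_succ]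
      have h1 : ((a :: t)[q' + 1] :: a :: t.eraseIdx q') = (t[q'] :: a :: t.eraseIdx q') := by simp
      rw [h1]
      exact (List.Perm.swap _ _ _).trans ((ih q' hq').cons a)

-- the loop invariant: B's loads list is an ascending sorted permutation of A's machines,
-- of unchanged (positive) length, and for ≥ 2 machines some load stays ≥ 0
def MInv (ms : List Int) (pq : List Int) : Prop :=
  pq.Pairwise (· ≤ ·) ∧ pq.Perm ms ∧ ms ≠ [] ∧ (2 ≤ pq.length → ∃ y ∈ pq, 0 ≤ y)

theorem step_inv {ms : List Int} {pq : List Int} (hinv : MInv ms pq) (i : Int) :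
    MInv (stepA ms i) (stepB pq i) := by
  obtain ⟨hsort, hperm, hne, hpos⟩ := hinv
  rcases pq with _ | ⟨x, rest⟩
  · exact absurd hperm.nil_eq.symm hne
  · -- A's min-scan succeeds and returns exactly the minimum (value, index) pair
    rcases hmin : (epairs 0 ms).foldl minStep none with _ | m
    · -- the scan of a non-empty list is never none
      exfalso
      rcases hE : epairs 0 ms with _ | ⟨z, t⟩
      · have hlen := congrArg List.length hE
        rw [epairs, List.length_map, PySem.List.length_enumerate] at hlen
        exact hne (List.eq_nil_of_length_eq_zero (by simpa using hlen))
      · rw [hE, List.foldl_cons, show minStep none z = some z from rfl] at hmin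
        exact foldl_step_ne_none t z hmin
          (by intro m x
              by_cases hc : (decide (x.1 < m.1) || (!decide (m.1 < x.1) && decide (x.2 < m.2))) = true
              · exact ⟨x, if_pos hc⟩
              · exact ⟨m, if_neg hc⟩)
    · obtain ⟨hmmem, hmall⟩ := minscan_min hmin
      obtain ⟨p, q⟩ := m
      obtain ⟨k, hk, hq, hp⟩ := mem_epairs hmmem
      -- p is the minimum load: p ∈ ms, and p ≤ every load
      have hpmem : p ∈ ms := by rw [hp]; exact List.getElem_mem hk
      have hplow : ∀ y ∈ ms, p ≤ y := by
        intro y hy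
        obtain ⟨j, hj, hyj⟩ := List.mem_iff_getElem.mp hy
        have := hmall _ (mem_epairs_of_getElem (s := 0) hj)
        rw [hyj] at this
        unfold lexLe at this
        simp only at this
        omega
      -- hence p = x, the head of B's sorted loads
      have hxp : x = p := by
        have h1 : x ≤ p := head_min hsort p (hperm.mem_iff.mpr hpmem)
        have h2 : p ≤ x := hplow x (hperm.subset List.mem_cons_self)
        omega
      have hq0 : (0 : Int) ≤ q := by omega
      have hget : PySem.List.pyGetD ms q 0 = p := by
        have := epairs_get hmmem
        simpa using this
      have hA : stepA ms i = ms.set q.toNat (p + i) := by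
        unfold stepA
        rw [minscan_bridge ms none 0, hmin]
        show PySem.List.pySetD ms q (PySem.List.pyGetD ms q 0 + i) = ms.set q.toNat (p + i)
        rw [hget, PySem.List.pySetD_of_nonneg ms (p + i) hq0]
      have hB : stepB (x :: rest) i = insortLoad rest (x + i) := rfl
      have hqk : q.toNat = k := by omega
      have hkget : ms[q.toNat]'(by omega) = p := by
        simp only [hqk]; exact hp.symm
      -- the multiset step: set q (p+i) ~ (p+i) :: eraseIdx q ~ (p+i) :: rest
      have hrest : (ms.eraseIdx q.toNat).Perm rest := by
        have h1 : (p :: ms.eraseIdx q.toNat).Perm ms := by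
          have := cons_eraseIdx_perm ms q.toNat (by omega)
          rwa [hkget] at this
        have h2 : (p :: rest).Perm ms := by rw [← hxp]; exact hperm
        exact (h1.trans h2.symm).cons_inv
      have hpermNew : (stepB (x :: rest) i).Perm (stepA ms i) := by
        rw [hA, hB, hxp]
        exact ((insortLoad_perm rest (p + i)).trans ((hrest.symm).cons (p + i))).trans
          (set_perm_cons_eraseIdx ms q.toNat (by omega) (p + i)).symm
      refine ⟨?_, hpermNew, ?_, ?_⟩
      · rw [hB]
        exact insortLoad_pairwise (List.Pairwise.of_cons hsort) _
      · rw [hA]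
        intro hnil
        have hlen := congrArg List.length hnil
        simp only [List.length_set, List.length_nil] at hlen
        exact hne (List.eq_nil_of_length_eq_zero hlen)
      · -- some load stays ≥ 0 when there are at least 2 machines
        intro hlen2
        have hlenB : (stepB (x :: rest) i).length = rest.length + 1 := by
          rw [hB]
          have := (insortLoad_perm rest (x + i)).length_eq
          simpa using this
        have hrlen : 1 ≤ rest.length := by omega
        obtain ⟨r0, hr0mem⟩ := List.exists_mem_of_ne_nil rest
          (by intro h; rw [h] at hrlen; simp at hrlen)
        have hsurv : ∀ z ∈ rest, z ∈ stepB (x :: rest) i := by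
          intro z hz
          rw [hB]
          exact (insortLoad_perm rest (x + i)).mem_iff.mpr (List.mem_cons_of_mem _ hz)
        obtain ⟨y, hy, hy0⟩ := hpos (by simp; omega)
        rcases List.mem_cons.mp hy with rfl | hyr
        · -- y = x: the head; any element of rest is ≥ x ≥ 0 and survives
          have hxr0 : y ≤ r0 := head_min hsort r0 (List.mem_cons_of_mem _ hr0mem)
          exact ⟨r0, hsurv r0 hr0mem, by omega⟩
        · exact ⟨y, hsurv y hyr, hy0⟩

theorem fold_inv (jobs : List Int) : ∀ (ms : List Int) (pq : List Int),
    MInv ms pq → MInv (jobs.foldl stepA ms) (jobs.foldl stepB pq) := by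
  induction jobs with
  | nil => intro ms pq h; exact h
  | cons j t ih =>
    intro ms pq h
    simpa using ih _ _ (step_inv h j)

-- A's final running-max loop is foldl max with seed 0
theorem final_max_eq (ms : List Int) :
    ms.foldl (fun makespan j => if j > makespan then j else makespan) 0 =
      ms.foldl max 0 := by
  rw [show (fun (makespan j : Int) => if j > makespan then j else makespan) = max from by
    funext a b; rw [Int.max_def]; split_ifs <;> omega]

-- A's final fold equals max 0 (B's last load)
theorem final_eq {ms : List Int} {pq : List Int} (hsort : pq.Pairwise (· ≤ ·))
    (hperm : pq.Perm ms) (hne : ms ≠ []) {L : Int} (hL : pq.getLast? = some L) :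
    ms.foldl max 0 = max 0 L := by
  have hLmem : L ∈ ms := hperm.subset (List.mem_of_getLast? hL)
  have hLmax : ∀ y ∈ ms, y ≤ L := fun y hy => last_max hsort hL y (hperm.mem_iff.mpr hy)
  have h1 := PySem.List.le_foldl_max ms 0
  have h2 := PySem.List.foldl_max_mem ms 0
  have hfoldL := h1.2 L hLmem
  rcases h2 with h2 | h2
  · rw [h2, Int.max_def]
    split_ifs <;> omega
  · have := hLmax _ h2
    rw [Int.max_def]
    split_ifs <;> omega

-- the initial state satisfies the invariant (numOfMachines ≥ 1)
theorem init_inv {n : Int} (hn : 0 < n) :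
    MInv (List.replicate n.toNat (0 : Int)) (List.replicate n.toNat (0 : Int)) := by
  refine ⟨List.pairwise_replicate.mpr (Or.inr le_rfl), List.Perm.refl _, by simp; omega, ?_⟩
  intro h2
  refine ⟨0, ?_, le_rfl⟩
  exact List.mem_replicate.mpr ⟨by omega, rfl⟩

-- the single-machine closed forms: one machine accumulates the whole job list
theorem stepA_singleton (a i : Int) : stepA [a] i = [a + i] := by
  show (match (minStep none (a, 0), (0 : Int) + 1).1 with
    | some pq => PySem.List.pySetD [a] pq.2 (PySem.List.pyGetD [a] pq.2 0 + i)
    | none => [a]) = [a + i]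
  show PySem.List.pySetD [a] 0 (PySem.List.pyGetD [a] 0 0 + i) = [a + i]
  simp [PySem.List.pySetD, PySem.List.pySet?, PySem.List.pyGetD, PySem.List.pyGet?, PySem.List.pyIdx?]

theorem stepB_singleton (a i : Int) : stepB [a] i = [a + i] := rfl

theorem foldA_singleton : ∀ (jobs : List Int) (a : Int),
    jobs.foldl stepA [a] = [a + jobs.sum] := by
  intro jobs
  induction jobs with
  | nil => intro a; simp
  | cons j t ih =>
    intro a
    rw [List.foldl_cons, stepA_singleton, ih, List.sum_cons]
    ring_nf

theorem foldB_singleton : ∀ (jobs : List Int) (a : Int),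
    jobs.foldl stepB [a] = [a + jobs.sum] := by
  intro jobs
  induction jobs with
  | nil => intro a; simp
  | cons j t ih =>
    intro a
    rw [List.foldl_cons, stepB_singleton, ih, List.sum_cons]
    ring_nf


theorem stepB_length {pq : List Int} (h : pq ≠ []) (i : Int) :
    (stepB pq i).length = pq.length := by
  rcases pq with _ | ⟨x, rest⟩
  · exact absurd rfl h
  · show (insortLoad rest (x + i)).length = rest.length + 1
    have := (insortLoad_perm rest (x + i)).length_eq
    simpa using this

theorem stepB_ne_nil {pq : List Int} (h : pq ≠ []) (i : Int) : stepB pq i ≠ [] := by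
  intro hc
  have := congrArg List.length hc
  rw [stepB_length h] at this
  rcases pq with _ | ⟨x, rest⟩
  · exact h rfl
  · simp at this

theorem foldB_length : ∀ (jobs : List Int) (pq : List Int), pq ≠ [] →
    (jobs.foldl stepB pq).length = pq.length := by
  intro jobs
  induction jobs with
  | nil => intro pq h; rfl
  | cons j t ih =>
    intro pq h
    rw [List.foldl_cons, ih _ (stepB_ne_nil h j), stepB_length h]

-- evaluation of both ports on one machine: the single load accumulates the whole job list
theorem single_eval (input : List Int) :
    sortedApproximation 1 input = max 0 input.sum ∧
      sortedApproximation_alt 1 input = input.sum := by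
  have hsum : (PySem.List.sorted input (fun x => x) true).sum = input.sum :=
    (PySem.List.sorted_perm input (fun x => x) true).sum_eq
  constructor
  · show ((PySem.List.sorted input (fun x => x) true).foldl stepA [0]).foldl
      (fun makespan j => if j > makespan then j else makespan) 0 = max 0 input.sum
    rw [final_max_eq, foldA_singleton, hsum]
    simp [Int.max_def]
  · show (match ((PySem.List.sorted input (fun x => x) true).foldl stepB [0]).getLast? with
      | some x => x
      | none => 0) = input.sum
    rw [foldB_singleton, hsum]
    simp

-- ===== VERDICT (by name: the statements are the Claim_ definitions above) =====
theorem sortedApproximation_spec : Claim_unchanged_sortedApproximation := by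
  intro n input _ hpre hnd
  by_cases h1 : n = 1
  · -- one machine: both sides reduce to the total job sum, which is ≥ 0 outside D_
    subst h1
    have hs := single_eval input
    rw [hs.1, hs.2]
    have hd : ¬ ((1 : Int) = 1 ∧ input.sum < 0) := hnd
    have hsum0 : 0 ≤ input.sum := by
      by_contra hc
      exact hd ⟨rfl, by omega⟩
    omega
  · -- at least two machines: some load stays ≥ 0, so max 0 is the identity on the makespan
    have hn2 : 2 ≤ n := by
      have := hpre
      unfold Pre_sortedApproximation at this
      omega
    show ((PySem.List.sorted input (fun x => x) true).foldl stepA (List.replicate n.toNat 0)).foldl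
      (fun makespan j => if j > makespan then j else makespan) 0 =
      (match ((PySem.List.sorted input (fun x => x) true).foldl stepB (List.replicate n.toNat 0)).getLast? with
       | some x => x
       | none => 0)
    rw [final_max_eq]
    have h0 := init_inv (show (0:Int) < n from by omega)
    obtain ⟨hsort, hperm, hne, hpos⟩ :=
      fold_inv (PySem.List.sorted input (fun x => x) true) _ _ h0
    set jobs := PySem.List.sorted input (fun x => x) true
    set pq := jobs.foldl stepB (List.replicate n.toNat 0) with hpq
    have hpqne : pq ≠ [] := by
      intro h
      rw [h] at hperm
      exact hne hperm.nil_eq.symm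
    rcases hL : pq.getLast? with _ | L
    · exact absurd (List.getLast?_eq_none_iff.mp hL) hpqne
    · rw [final_eq hsort hperm hne hL]
      show max 0 L = L
      have hlen : pq.length = n.toNat := by
        rw [hpq, foldB_length _ _ (by simp; omega)]
        simp
      obtain ⟨y, hy, hy0⟩ := hpos (by omega)
      have := last_max hsort hL y hy
      rw [Int.max_def]
      split_ifs <;> omega

theorem sortedApproximation_changed : Claim_changed_sortedApproximation := by
  unfold Claim_changed_sortedApproximation; decide

theorem sortedApproximation_tight : Claim_exact_sortedApproximation := by
  intro n input _ hpre hd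
  obtain ⟨h1, hsum⟩ := hd
  subst h1
  have hs := single_eval input
  rw [hs.1, hs.2]
  omega
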